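-- pv_equiv track=rewrite | github.com/patelmeshwa99/LeetCode | 84 - best code in python.py | nearestGreaterRight
-- ===== SOURCE A (Python) =====
-- def nearestGreaterRight(arr,n):
--     res=[];
--     for i in range(n):
--         temp = i+1;
--         total=0;
--         while temp < n and arr[temp] >= arr[i]:
--             total+=1;
--             temp+=1;
--         res.append(total)
--     return res
-- ===== SOURCE B (Python) =====
-- def nearestGreaterRight(arr, n):
--     # Monotonic stack: next strictly-smaller index to the right; answer = that index - i - 1.
--     res = []
--     stack = []  # indices, values strictly increasing from top (front) to bottom
--     for i in range(n - 1, -1, -1):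
--         while stack and arr[stack[-1]] >= arr[i]:
--             stack.pop()
--         ns = stack[-1] if stack else n
--         res.append(ns - i - 1)
--         stack.append(i)
--     res.reverse()
--     return res
-- ===== Notes on version B (the rewrite author's own statement) =====
-- stated objective: faster
-- what changed: A rescans rightwards from every index counting elements >= arr[i]; B makes one right-to-left pass with a monotonic stack that yields the next strictly-smaller index, so each index is pushed and popped at most once.
import Mathlib
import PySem

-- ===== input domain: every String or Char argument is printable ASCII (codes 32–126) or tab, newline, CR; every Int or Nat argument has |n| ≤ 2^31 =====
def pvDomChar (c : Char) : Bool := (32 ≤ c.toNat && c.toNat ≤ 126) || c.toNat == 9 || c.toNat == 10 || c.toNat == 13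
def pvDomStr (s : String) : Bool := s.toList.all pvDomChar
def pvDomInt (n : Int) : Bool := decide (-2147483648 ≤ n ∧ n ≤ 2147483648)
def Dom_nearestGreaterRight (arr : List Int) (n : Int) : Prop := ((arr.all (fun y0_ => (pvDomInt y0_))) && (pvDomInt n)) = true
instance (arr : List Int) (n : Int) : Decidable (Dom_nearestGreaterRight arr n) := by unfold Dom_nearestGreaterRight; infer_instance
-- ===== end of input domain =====

-- B replaces A's quadratic per-index rescan by a right-to-left monotonic stack
-- (next strictly-smaller index; answer = that index - i - 1): asymptotically faster.

-- ===== PORT A =====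
-- the inner `while temp < n and arr[temp] >= arr[i]` loop; fuel (n - temp).toNat runs it out exactly when temp reaches n
def aInner (arr : List Int) (n ai : Int) (temp total : Int) : Nat → Int
  | 0 => total
  | fuel + 1 =>
    if temp < n ∧ PySem.List.pyGetD arr temp 0 ≥ ai then
      aInner arr n ai (temp + 1) (total + 1) fuel
    else total

def nearestGreaterRight (arr : List Int) (n : Int) : List Int :=
  (PySem.List.pyRange 0 n 1).foldl
    (fun res i => res ++ [aInner arr n (PySem.List.pyGetD arr i 0) (i + 1) 0 (n - (i + 1)).toNat]) []

-- ===== PORT B =====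
-- `while stack and arr[stack[-1]] >= arr[i]: stack.pop()` (stack head = Python's stack[-1])
def popStack (arr : List Int) (ai : Int) : List Int → List Int
  | [] => []
  | t :: rest => if PySem.List.pyGetD arr t 0 ≥ ai then popStack arr ai rest else t :: rest

-- `ns = stack[-1] if stack else n`
def sHead (n : Int) : List Int → Int
  | [] => n
  | t :: _ => t

-- one iteration of B's `for i in range(n-1, -1, -1)` body over the state (res, stack)
def bStep (arr : List Int) (n : Int) (st : List Int × List Int) (i : Int) : List Int × List Int :=
  let s := popStack arr (PySem.List.pyGetD arr i 0) st.2
  (st.1 ++ [sHead n s - i - 1], i :: s)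

def nearestGreaterRight_alt (arr : List Int) (n : Int) : List Int :=
  (((PySem.List.pyRange (n - 1) (-1) (-1)).foldl (bStep arr n) ([], [])).1).reverse

-- ===== PRECONDITION & SPEC =====
-- Pre_ excludes exactly the inputs where Python A raises IndexError: n exceeding len(arr).
def Pre_nearestGreaterRight (arr : List Int) (n : Int) : Prop := n ≤ (arr.length : Int)
instance (arr : List Int) (n : Int) : Decidable (Pre_nearestGreaterRight arr n) := by
  unfold Pre_nearestGreaterRight; infer_instance

def pvWitness_nearestGreaterRight : List Int × Int := ([3, 1, 4, 1, 5], 5)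

def Spec_nearestGreaterRight (arr : List Int) (n : Int) (out : List Int) : Prop := out = nearestGreaterRight_alt arr n
instance (arr : List Int) (n : Int) (out : List Int) : Decidable (Spec_nearestGreaterRight arr n out) := by unfold Spec_nearestGreaterRight; infer_instance

-- ===== CLAIM (what is proved, stated in full; the proofs are below) =====
def Claim_equal_nearestGreaterRight : Prop := ∀ (arr : List Int) (n : Int), Dom_nearestGreaterRight arr n → Pre_nearestGreaterRight arr n → Spec_nearestGreaterRight arr n (nearestGreaterRight arr n)

-- ===== LEMMAS AND PROOFS =====

-- specification device: index of the next element strictly smaller than ai, scanning j, j+1, …; n if none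
def nsFrom (arr : List Int) (n ai j : Int) : Int :=
  if h : j < n then (if PySem.List.pyGetD arr j 0 < ai then j else nsFrom arr n ai (j + 1)) else n
termination_by (n - j).toNat
decreasing_by omega

lemma nsFrom_stop (arr : List Int) (n ai j : Int) (h : j < n)
    (hlt : PySem.List.pyGetD arr j 0 < ai) : nsFrom arr n ai j = j := by
  rw [nsFrom, dif_pos h, if_pos hlt]

lemma nsFrom_step (arr : List Int) (n ai j : Int) (h : j < n)
    (hge : ¬ PySem.List.pyGetD arr j 0 < ai) : nsFrom arr n ai j = nsFrom arr n ai (j + 1) := by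
  rw [nsFrom, dif_pos h, if_neg hge]

lemma nsFrom_end (arr : List Int) (n ai j : Int) (h : ¬ j < n) : nsFrom arr n ai j = n := by
  rw [nsFrom, dif_neg h]

-- the per-index value both programs compute
def entryG (arr : List Int) (n i : Int) : Int :=
  nsFrom arr n (PySem.List.pyGetD arr i 0) (i + 1) - (i + 1)

lemma aInner_eq (arr : List Int) (n ai : Int) :
    ∀ (fuel : Nat) (temp total : Int), temp ≤ n → (n - temp).toNat ≤ fuel →
      aInner arr n ai temp total fuel = total + nsFrom arr n ai temp - temp := by
  intro fuel
  induction fuel with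
  | zero =>
    intro temp total h1 h2
    have he : temp = n := by omega
    subst he
    rw [aInner, nsFrom_end arr _ ai _ (lt_irrefl _)]
    omega
  | succ f ih =>
    intro temp total h1 h2
    rw [aInner]
    by_cases hc : temp < n ∧ PySem.List.pyGetD arr temp 0 ≥ ai
    · rw [if_pos hc, ih (temp + 1) (total + 1) (by omega) (by omega),
        nsFrom_step arr n ai temp hc.1 (by omega)]
      omega
    · rw [if_neg hc]
      by_cases ht : temp < n
      · have hlt : PySem.List.pyGetD arr temp 0 < ai := by
          by_contra hge; exact hc ⟨ht, by omega⟩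
        rw [nsFrom_stop arr n ai temp ht hlt]
        omega
      · have he : temp = n := by omega
        subst he
        rw [nsFrom_end arr _ ai _ (lt_irrefl _)]
        omega

lemma portA_eq_map (arr : List Int) (n : Int) :
    nearestGreaterRight arr n = (PySem.List.pyRange 0 n 1).map (entryG arr n) := by
  unfold nearestGreaterRight
  rw [PySem.List.foldl_append_singleton_eq_map, List.nil_append]
  apply List.map_congr_left
  intro i hi
  have hmem := (PySem.List.mem_pyRange_one).1 hi
  rw [aInner_eq arr n _ _ _ _ (by omega) (by omega)]
  unfold entryG
  omega

-- popping with a weaker (smaller) threshold absorbs popping with a stronger one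
lemma popStack_absorb (arr : List Int) (v w : Int) (hvw : v ≤ w) :
    ∀ (s : List Int), popStack arr v (popStack arr w s) = popStack arr v s := by
  intro s
  induction s with
  | nil => rfl
  | cons t rest ih =>
    by_cases h : PySem.List.pyGetD arr t 0 ≥ w
    · rw [popStack, if_pos h, ih, popStack, if_pos (by omega)]
    · rw [popStack, if_neg h]

-- the stack invariant: popping with any threshold v exposes the next index ≥ i whose value is < v
def StackInv (arr : List Int) (n i : Int) (s : List Int) : Prop :=
  ∀ v : Int, sHead n (popStack arr v s) = nsFrom arr n v i

lemma stackInv_nil (arr : List Int) (n : Int) : StackInv arr n n [] := by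
  intro v
  rw [popStack, sHead, nsFrom, dif_neg (lt_irrefl n)]

lemma stackInv_step (arr : List Int) (n i : Int) (s : List Int) (_h0 : 0 ≤ i) (hn : i < n)
    (hInv : StackInv arr n (i + 1) s) :
    StackInv arr n i (i :: popStack arr (PySem.List.pyGetD arr i 0) s) := by
  intro v
  by_cases hv : PySem.List.pyGetD arr i 0 ≥ v
  · rw [popStack, if_pos hv, popStack_absorb arr v _ hv, hInv v,
      ← nsFrom_step arr n v i hn (by omega)]
  · rw [popStack, if_neg hv, sHead, nsFrom_stop arr n v i hn (by omega)]

lemma bFold (arr : List Int) (n : Int) :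
    ∀ (t : Nat) (m : Int), m = n - (t : Int) → 0 ≤ m →
      ((PySem.List.pyRange m n 1).reverse.foldl (bStep arr n) ([], [])).1
          = ((PySem.List.pyRange m n 1).reverse).map (entryG arr n)
        ∧ StackInv arr n m ((PySem.List.pyRange m n 1).reverse.foldl (bStep arr n) ([], [])).2 := by
  intro t
  induction t with
  | zero =>
    intro m hm h0
    have he : m = n := by omega
    subst he
    rw [PySem.List.pyRange_one_eq_nil (a := m) (b := m) le_rfl]
    exact ⟨rfl, stackInv_nil arr m⟩
  | succ t ih =>
    intro m hm h0
    have hlt : m < n := by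
      have : ((t : Int) + 1) = ((t + 1 : Nat) : Int) := by push_cast; ring
      omega
    obtain ⟨ih1, ih2⟩ := ih (m + 1) (by push_cast at hm ⊢; omega) (by omega)
    rw [PySem.List.pyRange_one_cons hlt, List.reverse_cons, List.foldl_append, List.foldl_cons,
      List.foldl_nil, List.map_append]
    set P := (PySem.List.pyRange (m + 1) n 1).reverse.foldl (bStep arr n) ([], []) with hP
    constructor
    · show (bStep arr n P m).1 = _
      rw [bStep]
      simp only
      rw [ih1]
      congr 1
      simp only [List.map_cons, List.map_nil]
      congr 1
      rw [ih2 (PySem.List.pyGetD arr m 0)]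
      unfold entryG
      omega
    · show StackInv arr n m (bStep arr n P m).2
      rw [bStep]
      exact stackInv_step arr n m P.2 h0 hlt ih2

lemma portB_eq_map (arr : List Int) (n : Int) :
    nearestGreaterRight_alt arr n = (PySem.List.pyRange 0 n 1).map (entryG arr n) := by
  unfold nearestGreaterRight_alt
  rw [PySem.List.pyRange_neg_one_eq_reverse,
    show (-1 : Int) + 1 = 0 from by norm_num, show n - 1 + 1 = n from by ring]
  by_cases hn : 0 < n
  · obtain ⟨h1, _⟩ := bFold arr n n.toNat 0 (by omega) (by omega)
    rw [h1, List.map_reverse, List.reverse_reverse]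
  · rw [PySem.List.pyRange_one_eq_nil (a := 0) (b := n) (by omega)]
    rfl

-- ===== VERDICT (by name: the statement is the Claim_ definition above) =====
theorem nearestGreaterRight_spec : Claim_equal_nearestGreaterRight := by
  intro arr n _ _
  unfold Spec_nearestGreaterRight
  rw [portA_eq_map, portB_eq_map]
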